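-- pv_equiv track=rewrite | github.com/TomCa56/python2048 | j2048_motor_42357.py | mover_esquerda
-- ===== SOURCE A (Python) =====
-- def mover_esquerda(uma_lista, movimento):
--     resultado = []
--     for valor in uma_lista:
--         if valor != 0:
--                resultado.append(valor)
--     while len(resultado) < len(uma_lista):
--             resultado.append(0)
--
--
--     for y in range(len(uma_lista)):
--         if uma_lista[y] != resultado[y]:
--             movimento = True
--
--
--     return (resultado, movimento)
-- ===== SOURCE B (Python) =====
-- def mover_esquerda(uma_lista, movimento):
--     resultado = []
--     vio_zero = False
--     for valor in uma_lista:
--         if valor == 0: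
--             vio_zero = True
--         else:
--             if vio_zero:
--                 movimento = True
--             resultado.append(valor)
--     resultado.extend([0] * (len(uma_lista) - len(resultado)))
--     return (resultado, movimento)
-- ===== Notes on version B (the rewrite author's own statement) =====
-- stated objective: alternative
-- what changed: Single pass that appends nonzeros and detects movement via a 'zero seen before a nonzero' flag, then pads with zeros in one extend, instead of A's three passes (filter loop, one-by-one padding while-loop, index-by-index comparison loop).
import Mathlib
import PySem

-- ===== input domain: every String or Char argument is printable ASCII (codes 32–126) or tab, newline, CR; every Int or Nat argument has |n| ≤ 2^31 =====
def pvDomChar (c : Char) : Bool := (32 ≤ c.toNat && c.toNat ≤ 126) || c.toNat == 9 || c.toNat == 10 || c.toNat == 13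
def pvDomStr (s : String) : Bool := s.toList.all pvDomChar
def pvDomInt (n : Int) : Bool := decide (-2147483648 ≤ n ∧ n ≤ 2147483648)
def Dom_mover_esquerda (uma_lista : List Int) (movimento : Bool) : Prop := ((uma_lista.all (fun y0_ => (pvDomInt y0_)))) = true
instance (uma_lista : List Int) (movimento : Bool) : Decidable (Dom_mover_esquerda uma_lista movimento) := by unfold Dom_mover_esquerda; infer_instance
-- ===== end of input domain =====

-- B replaces A's three passes (filter loop, one-by-one zero-padding while-loop, index-wise
-- comparison loop) by a single pass with a 'zero seen before a nonzero' flag plus one padding step.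

-- ===== PORT A =====
-- the while-loop 'while len(resultado) < len(uma_lista): resultado.append(0)'
def padZeros (res : List Int) (n : Nat) : List Int :=
  if res.length < n then padZeros (res ++ [0]) n else res
termination_by n - res.length
decreasing_by simp; omega

def mover_esquerda (uma_lista : List Int) (movimento : Bool) : List Int × Bool :=
  let resultado := uma_lista.foldl (fun acc valor => if valor ≠ 0 then acc ++ [valor] else acc) []
  let resultado := padZeros resultado uma_lista.length
  -- indices y below are always in range for both lists (equal lengths); pyGetD's default is never read
  let movimento := (PySem.List.pyRange 0 uma_lista.length 1).foldl
      (fun m y => if PySem.List.pyGetD uma_lista y 0 ≠ PySem.List.pyGetD resultado y 0 then true else m)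
      movimento
  (resultado, movimento)

-- ===== PORT B =====
-- state = (resultado, vio_zero, movimento)
def mover_esquerda_alt (uma_lista : List Int) (movimento : Bool) : List Int × Bool :=
  let s := uma_lista.foldl
      (fun (s : List Int × Bool × Bool) valor =>
        if valor = 0 then (s.1, true, s.2.2)
        else (s.1 ++ [valor], s.2.1, if s.2.1 then true else s.2.2))
      ([], false, movimento)
  (s.1 ++ List.replicate (uma_lista.length - s.1.length) 0, s.2.2)

-- ===== PRECONDITION & SPEC =====
def Spec_mover_esquerda (uma_lista : List Int) (movimento : Bool) (out : List Int × Bool) : Prop := out = mover_esquerda_alt uma_lista movimento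
instance (uma_lista : List Int) (movimento : Bool) (out : List Int × Bool) : Decidable (Spec_mover_esquerda uma_lista movimento out) := by unfold Spec_mover_esquerda; infer_instance

-- ===== CLAIM (what is proved, stated in full; the proofs are below) =====
def Claim_equal_mover_esquerda : Prop := ∀ (uma_lista : List Int) (movimento : Bool), Dom_mover_esquerda uma_lista movimento → Spec_mover_esquerda uma_lista movimento (mover_esquerda uma_lista movimento)

-- ===== LEMMAS AND PROOFS =====

-- B's movimento flag, as a recursive function of (vio_zero, remaining list)
def pvMovB : Bool → List Int → Bool
  | _, [] => false
  | vz, x :: xs => if x = 0 then pvMovB true xs else (vz || pvMovB vz xs)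

lemma pvMovB_cons_zero (vz : Bool) (xs : List Int) : pvMovB vz (0 :: xs) = pvMovB true xs := by
  simp [pvMovB]

lemma pvMovB_cons_ne (vz : Bool) (x : Int) (xs : List Int) (hx : x ≠ 0) :
    pvMovB vz (x :: xs) = (vz || pvMovB vz xs) := by
  simp [pvMovB, hx]

lemma foldA_filter (l : List Int) (acc : List Int) :
    l.foldl (fun acc valor => if valor ≠ 0 then acc ++ [valor] else acc) acc
      = acc ++ l.filter (· ≠ 0) := by
  induction l generalizing acc with
  | nil => simp
  | cons x xs ih =>
    rw [List.foldl_cons, ih]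
    by_cases hx : x = 0
    · simp [hx]
    · simp [hx]

lemma padZeros_eq_aux (k : Nat) : ∀ (res : List Int) (n : Nat), n - res.length = k →
    padZeros res n = res ++ List.replicate (n - res.length) 0 := by
  induction k with
  | zero =>
    intro res n h
    rw [padZeros]
    have hnl : ¬ res.length < n := by omega
    simp [hnl, h]
  | succ k ih =>
    intro res n h
    have hl : res.length < n := by omega
    rw [padZeros]
    simp only [hl, if_true]
    rw [ih (res ++ [0]) n (by simp; omega)]
    have h2 : n - res.length = (n - (res.length + 1)) + 1 := by omega
    simp [h2, List.replicate_succ]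

lemma padZeros_eq (res : List Int) (n : Nat) :
    padZeros res n = res ++ List.replicate (n - res.length) 0 :=
  padZeros_eq_aux (n - res.length) res n rfl

lemma foldB_inv (l : List Int) : ∀ (res : List Int) (vz m : Bool),
    l.foldl
      (fun (s : List Int × Bool × Bool) valor =>
        if valor = 0 then (s.1, true, s.2.2)
        else (s.1 ++ [valor], s.2.1, if s.2.1 then true else s.2.2))
      (res, vz, m)
      = (res ++ l.filter (· ≠ 0), vz || l.any (· = 0), m || pvMovB vz l) := by
  induction l with
  | nil => intro res vz m; simp [pvMovB]
  | cons x xs ih =>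
    intro res vz m
    rw [List.foldl_cons]
    by_cases hx : x = 0
    · subst hx
      rw [if_pos rfl, ih, pvMovB_cons_zero]
      simp
    · rw [if_neg hx, ih, pvMovB_cons_ne _ _ _ hx]
      refine Prod.ext ?_ (Prod.ext ?_ ?_)
      · simp [hx]
      · simp [hx]
      · cases vz <;> cases m <;> simp

lemma loopA (l r : List Int) (n : Nat) (m : Bool) :
    (PySem.List.pyRange 0 n 1).foldl
      (fun m y => if PySem.List.pyGetD l y 0 ≠ PySem.List.pyGetD r y 0 then true else m) m
      = (m || (List.range n).any (fun k => decide (l.getD k 0 ≠ r.getD k 0))) := by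
  induction n generalizing m with
  | zero => simp
  | succ n ih =>
    have hc : ((n + 1 : Nat) : Int) = (n : Int) + 1 := by push_cast; ring
    rw [hc, PySem.List.pyRange_one_succ_right (by positivity), List.foldl_append, ih,
      List.range_succ, List.any_append]
    simp only [List.foldl_cons, List.foldl_nil, List.any_cons, List.any_nil,
      PySem.List.pyGetD_natCast]
    simp [Bool.or_comm, Bool.or_left_comm]

lemma any_getD_ne (l r : List Int) (h : l.length = r.length) :
    ((List.range l.length).any fun k => decide (l.getD k 0 ≠ r.getD k 0)) = decide (l ≠ r) := by
  rw [Bool.eq_iff_iff]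
  simp only [List.any_eq_true, List.mem_range, decide_eq_true_eq]
  constructor
  · rintro ⟨k, hk, hne⟩ hlr; exact hne (by rw [hlr])
  · intro hlr
    by_contra hno
    push Not at hno
    apply hlr
    apply List.ext_getElem h
    intro i h1 h2
    have hi := hno i h1
    rwa [List.getD_eq_getElem _ _ h1, List.getD_eq_getElem _ _ h2] at hi

lemma movB_true (xs : List Int) : pvMovB true xs = xs.any (· ≠ 0) := by
  induction xs with
  | nil => simp [pvMovB]
  | cons x xs ih => by_cases hx : x = 0 <;> simp [pvMovB, hx, ih]

-- the padded filtered list equals l iff no zero precedes a nonzero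
lemma pad_eq_iff (l : List Int) :
    (l.filter (· ≠ 0) ++ List.replicate (l.length - (l.filter (· ≠ 0)).length) 0 = l)
      ↔ pvMovB false l = false := by
  induction l with
  | nil => simp [pvMovB]
  | cons x xs ih =>
    by_cases hx : x = 0
    · subst hx
      rw [pvMovB_cons_zero, movB_true]
      by_cases hz : xs.any (· ≠ 0) = true
      · -- a nonzero follows the leading zero: both sides false
        refine iff_of_false ?_ (by rw [hz]; simp)
        intro heq
        obtain ⟨y, hy, hyne⟩ := List.any_eq_true.mp hz
        have hfne : ((0 : Int) :: xs).filter (· ≠ 0) ≠ [] := by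
          simp only [ne_eq, List.filter_eq_nil_iff]
          push Not
          exact ⟨y, by simp [hy], by simpa using hyne⟩
        obtain ⟨h0, t0, hft⟩ := List.exists_cons_of_ne_nil hfne
        have hh0 : h0 ≠ 0 := by
          have hmem : h0 ∈ ((0 : Int) :: xs).filter (· ≠ 0) := by
            rw [hft]; exact List.mem_cons_self
          simpa using (List.of_mem_filter hmem)
        rw [hft, List.cons_append] at heq
        injection heq with heq1 _
        exact hh0 heq1
      · -- everything after the leading zero is zero: both sides hold
        have hall : ∀ y ∈ xs, y = 0 := by
          intro y hy
          by_contra hne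
          exact hz (List.any_eq_true.mpr ⟨y, hy, by simpa using hne⟩)
        refine iff_of_true ?_ (by simpa using hz)
        have hf : ((0 : Int) :: xs).filter (· ≠ 0) = [] := by
          rw [List.filter_eq_nil_iff]
          intro a ha
          rcases List.mem_cons.mp ha with h | h
          · simp [h]
          · simp [hall a h]
        have hxs : xs = List.replicate xs.length 0 := List.eq_replicate_of_mem hall
        rw [hf, List.nil_append]
        simp only [List.length_nil, List.length_cons, Nat.sub_zero, List.replicate_succ]
        exact congrArg (0 :: ·) hxs.symm
    · -- nonzero head: peel it off and use the IH
      rw [pvMovB_cons_ne _ _ _ hx, Bool.false_or,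
        List.filter_cons_of_pos (by simpa using hx)]
      simp only [List.length_cons, List.cons_append, List.cons.injEq, true_and]
      rw [show xs.length + 1 - ((xs.filter (· ≠ 0)).length + 1)
            = xs.length - (xs.filter (· ≠ 0)).length from by omega]
      exact ih

lemma pad_length (l : List Int) :
    (l.filter (· ≠ 0) ++ List.replicate (l.length - (l.filter (· ≠ 0)).length) 0).length
      = l.length := by
  rw [List.length_append, List.length_replicate]
  have := List.length_filter_le (· ≠ 0) l
  omega

-- ===== VERDICT (by name: the statement is the Claim_ definition above) =====
theorem mover_esquerda_spec : Claim_equal_mover_esquerda := by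
  intro l m _
  unfold Spec_mover_esquerda mover_esquerda mover_esquerda_alt
  simp only [foldA_filter, List.nil_append, padZeros_eq, foldB_inv]
  rw [loopA l _ l.length m, any_getD_ne l _ (pad_length l).symm]
  have hmov : pvMovB false l
      = decide (l ≠ l.filter (· ≠ 0)
          ++ List.replicate (l.length - (l.filter (· ≠ 0)).length) 0) := by
    rcases Bool.eq_false_or_eq_true (pvMovB false l) with h | h
    · rw [h]
      symm
      rw [decide_eq_true_eq]
      intro hlp
      rw [(pad_eq_iff l).mp hlp.symm] at h
      exact Bool.false_ne_true h
    · rw [h]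
      symm
      rw [decide_eq_false_iff_not, not_not]
      exact ((pad_eq_iff l).mpr h).symm
  rw [hmov]
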